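-- pv_equiv track=rewrite | github.com/AlexSobUcka/python_code | tt4.py | boring_prefix
-- ===== SOURCE A (Python) =====
-- def boring_prefix(value_lst):
--     counts = {}
--     max_num = 0
--     min_num = 1
--     boring_index = 0
--     temp = []
--     for i in range(len(value_lst)):
--         if value_lst[i] in counts:
--             counts[value_lst[i]] += 1
--         else:
--             counts[value_lst[i]] = 1
--         max_num = max(counts.values())
--         min_num = min(counts.values())
--         max_count = sum(value == max_num for value in counts.values())
--         min_count = sum(value == min_num for value in counts.values())
--         if (max_count + min_count == len(counts)) and (max_count == 1 or min_count == 1):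
--             temp.append(i+1)
--         elif max_count == min_count == len(counts):
--             temp.append(i + 1)
--     temp.sort()
--     return temp[-1]
-- ===== SOURCE B (Python) =====
-- def boring_prefix(value_lst):
--     counts = {}          # value -> frequency
--     cof = {}             # frequency -> how many values have that frequency
--     best = 0
--     for i, v in enumerate(value_lst):
--         f = counts.get(v, 0)
--         if f:
--             cof[f] -= 1
--             if not cof[f]:
--                 del cof[f]
--         counts[v] = f + 1
--         cof[f + 1] = cof.get(f + 1, 0) + 1
--         if len(cof) == 1 or (len(cof) == 2 and 1 in cof.values()):
--             best = i + 1
--     return best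
-- ===== Notes on version B (the rewrite author's own statement) =====
-- stated objective: faster
-- what changed: Instead of rescanning all of counts.values() four times per element (max, min, two counting sums) and collecting valid indices in a list that is sorted at the end, B maintains a frequency-of-frequencies dict updated in O(1) per element and remembers only the last valid index, making the whole function a single O(n) pass.
import Mathlib
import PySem

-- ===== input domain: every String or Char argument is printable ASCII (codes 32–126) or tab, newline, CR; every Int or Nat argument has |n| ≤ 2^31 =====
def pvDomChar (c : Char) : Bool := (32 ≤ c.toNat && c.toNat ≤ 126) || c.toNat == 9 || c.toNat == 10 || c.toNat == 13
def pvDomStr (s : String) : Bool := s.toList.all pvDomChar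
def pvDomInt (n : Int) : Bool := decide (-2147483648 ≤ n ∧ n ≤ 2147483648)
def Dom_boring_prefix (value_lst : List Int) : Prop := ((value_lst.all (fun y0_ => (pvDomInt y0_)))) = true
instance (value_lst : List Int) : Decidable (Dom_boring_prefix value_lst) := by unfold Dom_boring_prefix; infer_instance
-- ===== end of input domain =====

-- B replaces A's per-element rescans of counts.values() (max, min, two counting sums) and its final
-- sort of the collected index list by a single pass with a frequency-of-frequencies dict and a running
-- last-valid-index (objective: faster, measured asymptotic).


-- ===== PORT A =====
-- the body of A's for-loop (literal transliteration; i is the loop index, v = value_lst[i])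
def pvStepA (st : PySem.Dict Int Int × List Int) (i v : Int) : PySem.Dict Int Int × List Int :=
  let counts := if st.1.contains v then st.1.insert v (st.1.getD v 0 + 1) else st.1.insert v 1
  let max_num := (PySem.List.max? counts.values (fun x => x)).getD 0
  let min_num := (PySem.List.min? counts.values (fun x => x)).getD 1
  let max_count := (counts.values.map (fun value => if value == max_num then (1 : Int) else 0)).sum
  let min_count := (counts.values.map (fun value => if value == min_num then (1 : Int) else 0)).sum
  let temp :=
    if max_count + min_count == (counts.size : Int) && (max_count == 1 || min_count == 1) then
      st.2 ++ [i + 1]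
    else if max_count == min_count && min_count == (counts.size : Int) then
      st.2 ++ [i + 1]
    else st.2
  (counts, temp)


def boring_prefix (value_lst : List Int) : Int :=
  let r := (PySem.List.pyRange 0 (PySem.List.len value_lst) 1).foldl
      (fun st i => pvStepA st i (PySem.List.pyGetD value_lst i 0)) (PySem.Dict.empty, [])
  PySem.List.pyGetD (PySem.List.sorted r.2 (fun x => x)) (-1) 0


-- ===== PORT B =====
-- the body of B's for-loop (literal transliteration of Source B)
def pvStepB (st : PySem.Dict Int Int × PySem.Dict Int Int × Int) (i v : Int) :
    PySem.Dict Int Int × PySem.Dict Int Int × Int :=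
  let f := st.1.getD v 0
  let cof :=
    if f != 0 then
      let cof1 := (st.2.1).insert f ((st.2.1).getD f 0 - 1)
      if cof1.getD f 0 == 0 then cof1.erase f else cof1
    else st.2.1
  let counts := st.1.insert v (f + 1)
  let cof := cof.insert (f + 1) (cof.getD (f + 1) 0 + 1)
  let best := if cof.size == 1 || (cof.size == 2 && cof.values.contains 1) then i + 1 else st.2.2
  (counts, cof, best)


def boring_prefix_alt (value_lst : List Int) : Int :=
  ((PySem.List.enumerate value_lst 0).foldl (fun st iv => pvStepB st iv.1 iv.2)
    (PySem.Dict.empty, PySem.Dict.empty, 0)).2.2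


-- ===== PRECONDITION & SPEC =====
-- Pre_ excludes only the empty list, on which Python A raises IndexError (temp[-1] on an empty temp).
def Pre_boring_prefix (value_lst : List Int) : Prop := value_lst ≠ []
instance (value_lst : List Int) : Decidable (Pre_boring_prefix value_lst) := by
  unfold Pre_boring_prefix; infer_instance

def pvWitness_boring_prefix : List Int := [1, 2, 1]

def Spec_boring_prefix (value_lst : List Int) (out : Int) : Prop := out = boring_prefix_alt value_lst
instance (value_lst : List Int) (out : Int) : Decidable (Spec_boring_prefix value_lst out) := by
  unfold Spec_boring_prefix; infer_instance

-- ===== CLAIM (what is proved, stated in full; the proofs are below) =====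
def Claim_equal_boring_prefix : Prop := ∀ (value_lst : List Int), Dom_boring_prefix value_lst →
  Pre_boring_prefix value_lst → Spec_boring_prefix value_lst (boring_prefix value_lst)

-- ===== LEMMAS AND PROOFS =====

theorem pvFind?_filter_ne (l : List (Int × Int)) (k k' : Int) (h : k' ≠ k) :
    List.find? (fun p => p.1 == k') (l.filter (fun p => !(p.1 == k))) =
      List.find? (fun p => p.1 == k') l := by
  induction l with
  | nil => rfl
  | cons p t ih =>
    by_cases hk : p.1 = k
    · simp [hk, Ne.symm h, ih]
    · by_cases hk' : p.1 = k'
      · simp [hk', h]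
      · simp [hk, hk', ih]

theorem pvGet?_erase_self (d : PySem.Dict Int Int) (k : Int) : (d.erase k).get? k = none := by
  simp only [PySem.Dict.erase, PySem.Dict.get?, Option.map_eq_none_iff]
  rw [List.find?_eq_none]
  intro p hp
  simp only [List.mem_filter] at hp
  simpa using hp.2

theorem pvGet?_erase_of_ne (d : PySem.Dict Int Int) (k k' : Int) (h : k' ≠ k) :
    (d.erase k).get? k' = d.get? k' := by
  simp only [PySem.Dict.erase, PySem.Dict.get?]
  rw [pvFind?_filter_ne _ _ _ h]

theorem pvKeys_erase (d : PySem.Dict Int Int) (k : Int) :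
    (d.erase k).keys = d.keys.filter (fun x => !(x == k)) := by
  simp only [PySem.Dict.erase, PySem.Dict.keys]
  rw [List.filter_map]
  rfl

theorem pvNodup_keys_erase (d : PySem.Dict Int Int) (k : Int) (h : d.keys.Nodup) :
    (d.erase k).keys.Nodup := by
  rw [pvKeys_erase]; exact h.filter _

theorem pvExists_split (d : PySem.Dict Int Int) (v : Int) (hnd : d.keys.Nodup)
    (hc : d.contains v = true) :
    ∃ l1 l2, d.items = l1 ++ (v, d.getD v 0) :: l2 ∧ (∀ p ∈ l1, p.1 ≠ v) ∧ (∀ p ∈ l2, p.1 ≠ v) := by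
  rw [PySem.Dict.contains_iff_mem_keys] at hc
  simp only [PySem.Dict.keys, List.mem_map] at hc
  obtain ⟨p, hp, hpv⟩ := hc
  obtain ⟨l1, l2, hsplit⟩ := List.append_of_mem hp
  have hp2 : p = (v, d.getD v 0) := by
    have := PySem.Dict.getD_of_mem_items (d := d) (k := p.1) (v := p.2) (by simpa using hp) hnd (d0 := 0)
    cases p; simp_all
  simp only [PySem.Dict.keys] at hnd
  rw [hsplit] at hnd
  simp only [List.map_append, List.map_cons, List.nodup_append, List.nodup_cons] at hnd
  refine ⟨l1, l2, by rw [hsplit, hp2], ?_, ?_⟩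
  · intro q hq hqv
    exact hnd.2.2 q.1 (List.mem_map_of_mem hq) p.1 (List.mem_cons_self ..) (by rw [hqv, hpv])
  · intro q hq hqv
    exact hnd.2.1.1 (by rw [hpv, ← hqv]; exact List.mem_map_of_mem hq)

theorem pvValues_insert_contains (d : PySem.Dict Int Int) (v w : Int) (hnd : d.keys.Nodup)
    (hc : d.contains v = true) :
    ∃ m1 m2, d.values = m1 ++ d.getD v 0 :: m2 ∧ (d.insert v w).values = m1 ++ w :: m2 := by
  obtain ⟨l1, l2, hs, h1, h2⟩ := pvExists_split d v hnd hc
  refine ⟨l1.map (·.2), l2.map (·.2), ?_, ?_⟩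
  · simp [PySem.Dict.values, hs]
  · rw [PySem.Dict.values, PySem.Dict.items_insert_of_contains d w hc, hs]
    simp only [List.map_append, List.map_map, List.map_cons]
    have e1 : ∀ pl : List (Int × Int), (∀ p ∈ pl, p.1 ≠ v) →
        pl.map ((fun x => x.2) ∘ (fun p => if (p.1 == v) = true then (v, w) else p)) = pl.map (·.2) := by
      intro pl h
      apply List.map_congr_left
      intro p hp
      simp [h p hp]
    rw [e1 l1 h1, e1 l2 h2]
    simp

theorem pvValues_insert_not_contains (d : PySem.Dict Int Int) (v w : Int)
    (hc : d.contains v = false) :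
    (d.insert v w).values = d.values ++ [w] := by
  rw [PySem.Dict.values, PySem.Dict.items_insert_of_not_contains d w hc]
  simp [PySem.Dict.values]

theorem pvGetD_mem_values (d : PySem.Dict Int Int) (v : Int) (hnd : d.keys.Nodup)
    (hc : d.contains v = true) : d.getD v 0 ∈ d.values := by
  obtain ⟨l1, l2, hs, _, _⟩ := pvExists_split d v hnd hc
  rw [PySem.Dict.values, hs]
  simp

theorem pvCount_add_count (x y : Int) (h : x ≠ y) (l : List Int) :
    l.count x + l.count y = l.countP (fun e => e == x || e == y) := by
  induction l with
  | nil => rfl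
  | cons a t ih =>
    by_cases hx : a = x <;> by_cases hy : a = y <;>
      simp_all <;> omega

theorem pvCond_eq (vs K : List Int) (_hne : vs ≠ []) (hnd : K.Nodup)
    (hmem : ∀ f, f ∈ K ↔ f ∈ vs) (mx mn : Int)
    (hmx : PySem.List.max? vs (fun x => x) = some mx)
    (hmn : PySem.List.min? vs (fun x => x) = some mn) :
    ((vs.count mx + vs.count mn = vs.length ∧ (vs.count mx = 1 ∨ vs.count mn = 1)) ∨
      (vs.count mx = vs.count mn ∧ vs.count mn = vs.length))
    ↔ (K.length = 1 ∨ (K.length = 2 ∧ ∃ f ∈ vs, vs.count f = 1)) := by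
  have hmxv : mx ∈ vs := PySem.List.max?_mem hmx
  have hmnv : mn ∈ vs := PySem.List.min?_mem hmn
  have hub : ∀ y ∈ vs, y ≤ mx := PySem.List.max?_isMax hmx
  have hlb : ∀ y ∈ vs, mn ≤ y := PySem.List.min?_isMin hmn
  have hKsub : ∀ f ∈ K, f ∈ vs := fun f hf => (hmem f).1 hf
  have hvsK : ∀ f ∈ vs, f ∈ K := fun f hf => (hmem f).2 hf
  match K, hnd with
  | [], _ =>
    exact absurd (hvsK mx hmxv) (by simp)
  | [a], _ =>
    have hall : ∀ y ∈ vs, y = a := fun y hy => by simpa using hvsK y hy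
    have hmxa : mx = a := hall mx hmxv
    have hmna : mn = a := hall mn hmnv
    have hcl : vs.count a = vs.length := List.count_eq_length.2 (fun b hb => (hall b hb).symm)
    simp [hmxa, hmna, hcl]
  | [a, b], hnd =>
    have hab : a ≠ b := by simpa using hnd
    have ha : a ∈ vs := hKsub a (by simp)
    have hb : b ∈ vs := hKsub b (by simp)
    have hall : ∀ y ∈ vs, y = a ∨ y = b := fun y hy => by simpa using hvsK y hy
    have hmxmn : mx ≠ mn := by
      intro h
      have h1 := le_antisymm (hub a ha) (h ▸ hlb a ha)
      have h2 := le_antisymm (hub b hb) (h ▸ hlb b hb)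
      exact hab (h1.trans h2.symm)
    have hmm : (mx = a ∧ mn = b) ∨ (mx = b ∧ mn = a) := by
      rcases hall mx hmxv with h1 | h1 <;> rcases hall mn hmnv with h2 | h2 <;>
        simp_all
    have hallmm : ∀ y ∈ vs, y = mx ∨ y = mn := by
      intro y hy
      rcases hmm with ⟨e1, e2⟩ | ⟨e1, e2⟩ <;> rcases hall y hy with h | h <;> simp [e1, e2, h]
    have hsum : vs.count mx + vs.count mn = vs.length := by
      rw [pvCount_add_count mx mn hmxmn]
      refine List.countP_eq_length.2 ?_
      intro e he
      rcases hallmm e he with h | h <;> simp [h]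
    have hnotall : ¬ vs.count mn = vs.length := by
      intro h
      have := List.count_eq_length.1 h mx hmxv
      exact hmxmn this.symm
    constructor
    · rintro (⟨_, h⟩ | ⟨h1, h2⟩)
      · refine Or.inr ⟨rfl, ?_⟩
        rcases h with h | h
        exacts [⟨mx, hmxv, h⟩, ⟨mn, hmnv, h⟩]
      · exact absurd h2 hnotall
    · rintro (h | ⟨_, f, hf, hcf⟩)
      · simp at h
      · refine Or.inl ⟨hsum, ?_⟩
        rcases hallmm f hf with h | h <;> rw [h] at hcf <;> simp [hcf]
  | a :: b :: c :: t, hnd =>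
    have hab : a ≠ b := by simp [List.nodup_cons] at hnd; tauto
    have hac : a ≠ c := by simp [List.nodup_cons] at hnd; tauto
    have hbc : b ≠ c := by simp [List.nodup_cons] at hnd; tauto
    have ha : a ∈ vs := hKsub a (by simp)
    have hb : b ∈ vs := hKsub b (by simp)
    have hc : c ∈ vs := hKsub c (by simp)
    have hmxmn : mx ≠ mn := by
      intro h
      have h1 := le_antisymm (hub a ha) (h ▸ hlb a ha)
      have h2 := le_antisymm (hub b hb) (h ▸ hlb b hb)
      exact hab (h1.trans h2.symm)
    have hnotall : ¬ vs.count mn = vs.length := by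
      intro h
      have := List.count_eq_length.1 h mx hmxv
      exact hmxmn this.symm
    have hnotsum : ¬ vs.count mx + vs.count mn = vs.length := by
      intro h
      rw [pvCount_add_count mx mn hmxmn] at h
      have hall2 := List.countP_eq_length.1 h
      have ka := hall2 a ha
      have kb := hall2 b hb
      have kc := hall2 c hc
      simp only [Bool.or_eq_true, beq_iff_eq] at ka kb kc
      rcases ka with ka | ka <;> rcases kb with kb | kb <;> rcases kc with kc | kc <;>
        simp_all
    constructor
    · rintro (⟨h, _⟩ | ⟨_, h⟩)
      · exact absurd h hnotsum
      · exact absurd h hnotall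
    · rintro (h | ⟨h, _⟩) <;> simp at h

def pvCofRel (cof : PySem.Dict Int Int) (vs : List Int) : Prop :=
  cof.keys.Nodup ∧ ∀ f : Int, cof.get? f = if vs.count f = 0 then none else some ((vs.count f : Nat) : Int)

theorem pvCofRel_getD (cof : PySem.Dict Int Int) (vs : List Int) (h : pvCofRel cof vs) (f : Int) :
    cof.getD f 0 = ((vs.count f : Nat) : Int) := by
  rw [PySem.Dict.getD_eq_get?_getD, h.2 f]
  split <;> simp_all

theorem pvCofRel_mem_keys (cof : PySem.Dict Int Int) (vs : List Int) (h : pvCofRel cof vs) (f : Int) :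
    f ∈ cof.keys ↔ f ∈ vs := by
  rw [← not_iff_not, ← PySem.Dict.get?_eq_none_iff_not_mem_keys, h.2 f]
  split <;> simp_all [List.count_eq_zero]

theorem pvCofRel_contains_one (cof : PySem.Dict Int Int) (vs : List Int) (h : pvCofRel cof vs) :
    cof.values.contains 1 = true ↔ ∃ f ∈ vs, vs.count f = 1 := by
  constructor
  · intro h1
    simp only [List.contains_iff_mem, PySem.Dict.values, List.mem_map] at h1
    obtain ⟨p, hp, hp2⟩ := h1
    have hg : cof.get? p.1 = some 1 := by
      have := PySem.Dict.get?_of_mem_items (d := cof) (k := p.1) (v := p.2) (by simpa using hp) h.1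
      rw [this, hp2]
    rw [h.2 p.1] at hg
    by_cases hz : vs.count p.1 = 0
    · simp [hz] at hg
    · simp only [hz, if_false, Option.some.injEq] at hg
      refine ⟨p.1, List.count_pos_iff.1 (Nat.pos_of_ne_zero hz), ?_⟩
      omega
  · rintro ⟨f, hf, hcf⟩
    have hg : cof.get? f = some 1 := by rw [h.2 f, hcf]; simp
    have := PySem.Dict.mem_items_of_get?_eq_some cof hg
    simp only [List.contains_iff_mem, PySem.Dict.values, List.mem_map]
    exact ⟨(f, 1), this, rfl⟩

theorem pvCount3 (counts : PySem.Dict Int Int) (v : Int) (hnd : counts.keys.Nodup)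
    (hc : counts.contains v = true) :
    ((counts.insert v (counts.getD v 0 + 1)).values.count (counts.getD v 0 + 1)
        = counts.values.count (counts.getD v 0 + 1) + 1) ∧
    ((counts.insert v (counts.getD v 0 + 1)).values.count (counts.getD v 0) + 1
        = counts.values.count (counts.getD v 0)) ∧
    (∀ g : Int, g ≠ counts.getD v 0 → g ≠ counts.getD v 0 + 1 →
      (counts.insert v (counts.getD v 0 + 1)).values.count g = counts.values.count g) := by
  obtain ⟨m1, m2, hm, hm'⟩ := pvValues_insert_contains counts v (counts.getD v 0 + 1) hnd hc
  rw [hm, hm']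
  refine ⟨?_, ?_, ?_⟩
  · simp [List.count_append]
    omega
  · simp [List.count_append]
    omega
  · intro g h1 h2
    simp [List.count_append, Ne.symm h1, Ne.symm h2]

theorem pvCofRel_insert (counts cof : PySem.Dict Int Int) (v : Int)
    (hnd : counts.keys.Nodup) (hpos : ∀ w ∈ counts.values, 1 ≤ w)
    (hrel : pvCofRel cof counts.values) :
    pvCofRel
      (let f := counts.getD v 0
       let cof2 :=
         if f != 0 then
           let cof1 := cof.insert f (cof.getD f 0 - 1)
           if cof1.getD f 0 == 0 then cof1.erase f else cof1
         else cof
       cof2.insert (f + 1) (cof2.getD (f + 1) 0 + 1))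
      ((counts.insert v (counts.getD v 0 + 1)).values) := by
  dsimp only
  by_cases hc : counts.contains v = true
  case neg =>
    -- value not seen before: counts.getD v 0 = 0, new count 1
    have hcf : counts.contains v = false := by simpa using hc
    rw [PySem.Dict.getD_of_not_contains counts 0 hcf]
    have hvs' : (counts.insert v (0 + 1)).values = counts.values ++ [1] :=
      pvValues_insert_not_contains counts v (0 + 1) hcf
    rw [zero_add] at hvs'
    simp only [bne_self_eq_false, Bool.false_eq_true, if_false, zero_add]
    refine ⟨PySem.Dict.nodup_keys_insert cof 1 _ hrel.1, ?_⟩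
    intro g
    by_cases hg : g = 1
    · subst hg
      rw [PySem.Dict.get?_insert_self, pvCofRel_getD cof counts.values hrel 1, hvs']
      simp [List.count_append]
    · rw [PySem.Dict.get?_insert_of_ne cof _ hg, hrel.2 g, hvs']
      simp [List.count_append, Ne.symm hg]
  case pos =>
    -- value seen before: its count goes f → f + 1
    have hfv : counts.getD v 0 ∈ counts.values := pvGetD_mem_values counts v hnd hc
    have hf1 : 1 ≤ counts.getD v 0 := hpos _ hfv
    have hfne : (counts.getD v 0 != 0) = true := by simp; omega
    have hcf : 1 ≤ counts.values.count (counts.getD v 0) := List.count_pos_iff.2 hfv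
    obtain ⟨hA, hB, hC⟩ := pvCount3 counts v hnd hc
    have hgd : cof.getD (counts.getD v 0) 0 = ((counts.values.count (counts.getD v 0) : Nat) : Int) :=
      pvCofRel_getD cof counts.values hrel _
    have hgd1 : (cof.insert (counts.getD v 0) (cof.getD (counts.getD v 0) 0 - 1)).getD (counts.getD v 0) 0
        = ((counts.values.count (counts.getD v 0) : Nat) : Int) - 1 := by
      rw [PySem.Dict.getD_insert_self, hgd]
    simp only [hfne, if_true]
    by_cases h1 : counts.values.count (counts.getD v 0) = 1
    case pos =>
      have hz : ((cof.insert (counts.getD v 0) (cof.getD (counts.getD v 0) 0 - 1)).getD (counts.getD v 0) 0 == 0) = true := by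
        rw [hgd1, h1]; simp
      simp only [hz, if_true]
      refine ⟨PySem.Dict.nodup_keys_insert _ _ _
          (pvNodup_keys_erase _ _ (PySem.Dict.nodup_keys_insert cof _ _ hrel.1)), ?_⟩
      intro g
      by_cases hg1 : g = counts.getD v 0 + 1
      · subst hg1
        rw [PySem.Dict.get?_insert_self, PySem.Dict.getD_eq_get?_getD,
          pvGet?_erase_of_ne _ _ _ (by omega), PySem.Dict.get?_insert_of_ne cof _ (by omega),
          ← PySem.Dict.getD_eq_get?_getD, pvCofRel_getD cof counts.values hrel _]
        simp [hA]
      · rw [PySem.Dict.get?_insert_of_ne _ _ hg1]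
        by_cases hg2 : g = counts.getD v 0
        · subst hg2
          rw [pvGet?_erase_self]
          have hz2 : (counts.insert v (counts.getD v 0 + 1)).values.count (counts.getD v 0) = 0 := by
            omega
          simp [hz2]
        · rw [pvGet?_erase_of_ne _ _ _ hg2, PySem.Dict.get?_insert_of_ne cof _ hg2, hrel.2 g,
            hC g hg2 hg1]
    case neg =>
      have hz : ((cof.insert (counts.getD v 0) (cof.getD (counts.getD v 0) 0 - 1)).getD (counts.getD v 0) 0 == 0) = false := by
        rw [hgd1]; simp; omega
      simp only [hz, Bool.false_eq_true, if_false]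
      refine ⟨PySem.Dict.nodup_keys_insert _ _ _ (PySem.Dict.nodup_keys_insert cof _ _ hrel.1), ?_⟩
      intro g
      by_cases hg1 : g = counts.getD v 0 + 1
      · subst hg1
        rw [PySem.Dict.get?_insert_self, PySem.Dict.getD_insert_of_ne _ _ _ (by omega),
          pvCofRel_getD cof counts.values hrel _]
        simp [hA]
      · rw [PySem.Dict.get?_insert_of_ne _ _ hg1]
        by_cases hg2 : g = counts.getD v 0
        · subst hg2
          rw [PySem.Dict.get?_insert_self, hgd]
          have hnz : ¬ (counts.insert v (counts.getD v 0 + 1)).values.count (counts.getD v 0) = 0 → True := fun _ => trivial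
          by_cases hzz : (counts.insert v (counts.getD v 0 + 1)).values.count (counts.getD v 0) = 0
          · exfalso; omega
          · simp [hzz]
            omega
        · rw [PySem.Dict.get?_insert_of_ne cof _ hg2, hrel.2 g, hC g hg2 hg1]

theorem pvCondAB (counts' cof' : PySem.Dict Int Int) (hne' : counts'.values ≠ [])
    (hrel' : pvCofRel cof' counts'.values) :
    (((counts'.values.map (fun value =>
          if value == (PySem.List.max? counts'.values (fun x => x)).getD 0 then (1 : Int) else 0)).sum
        + (counts'.values.map (fun value =>
          if value == (PySem.List.min? counts'.values (fun x => x)).getD 1 then (1 : Int) else 0)).sum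
        == (counts'.size : Int)
      && ((counts'.values.map (fun value =>
          if value == (PySem.List.max? counts'.values (fun x => x)).getD 0 then (1 : Int) else 0)).sum == 1
        || (counts'.values.map (fun value =>
          if value == (PySem.List.min? counts'.values (fun x => x)).getD 1 then (1 : Int) else 0)).sum == 1))
    || ((counts'.values.map (fun value =>
          if value == (PySem.List.max? counts'.values (fun x => x)).getD 0 then (1 : Int) else 0)).sum
        == (counts'.values.map (fun value =>
          if value == (PySem.List.min? counts'.values (fun x => x)).getD 1 then (1 : Int) else 0)).sum
      && (counts'.values.map (fun value =>
          if value == (PySem.List.min? counts'.values (fun x => x)).getD 1 then (1 : Int) else 0)).sum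
        == (counts'.size : Int)))
    = (cof'.size == 1 || (cof'.size == 2 && cof'.values.contains 1)) := by
  obtain ⟨mx, hmx⟩ : ∃ mx, PySem.List.max? counts'.values (fun x => x) = some mx := by
    cases h : PySem.List.max? counts'.values (fun x => x) with
    | none => exact absurd ((PySem.List.max?_eq_none_iff _ _).1 h) hne'
    | some m => exact ⟨m, rfl⟩
  obtain ⟨mn, hmn⟩ : ∃ mn, PySem.List.min? counts'.values (fun x => x) = some mn := by
    cases h : PySem.List.min? counts'.values (fun x => x) with
    | none => exact absurd ((PySem.List.min?_eq_none_iff _ _).1 h) hne'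
    | some m => exact ⟨m, rfl⟩
  simp only [PySem.List.sum_map_ite_one_zero]
  rw [hmx, hmn]
  simp only [Option.getD_some, ← List.count_eq_countP]
  have hsize : (counts'.size : Int) = (counts'.values.length : Int) := by
    simp [PySem.Dict.size, PySem.Dict.values]
  have hsize2 : cof'.size = cof'.keys.length := by
    simp [PySem.Dict.size, PySem.Dict.keys]
  rw [hsize, hsize2, Bool.eq_iff_iff]
  simp only [Bool.or_eq_true, Bool.and_eq_true, beq_iff_eq]
  rw [pvCofRel_contains_one cof' counts'.values hrel']
  have hiff := pvCond_eq counts'.values cof'.keys hne' hrel'.1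
    (fun f => pvCofRel_mem_keys cof' counts'.values hrel' f) mx mn hmx hmn
  have e1 : ((counts'.values.count mx : Int) + (counts'.values.count mn : Int) = (counts'.values.length : Int))
      ↔ counts'.values.count mx + counts'.values.count mn = counts'.values.length := by omega
  have e2 : ((counts'.values.count mx : Int) = 1) ↔ counts'.values.count mx = 1 := by omega
  have e3 : ((counts'.values.count mn : Int) = 1) ↔ counts'.values.count mn = 1 := by omega
  have e4 : ((counts'.values.count mx : Int) = (counts'.values.count mn : Int))
      ↔ counts'.values.count mx = counts'.values.count mn := by omega
  have e5 : ((counts'.values.count mn : Int) = (counts'.values.length : Int))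
      ↔ counts'.values.count mn = counts'.values.length := by omega
  rw [e1, e2, e3, e4, e5]
  exact hiff

theorem pvCountsA_eq (d : PySem.Dict Int Int) (v : Int) :
    (if d.contains v then d.insert v (d.getD v 0 + 1) else d.insert v 1)
      = d.insert v (d.getD v 0 + 1) := by
  by_cases h : d.contains v = true
  · simp [h]
  · have hf : d.contains v = false := by simpa using h
    rw [PySem.Dict.getD_of_not_contains d 0 hf]
    simp [hf]

theorem pvValues_insert_ne_nil (d : PySem.Dict Int Int) (v w : Int) :
    (d.insert v w).values ≠ [] := by
  by_cases h : d.contains v = true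
  · obtain ⟨l1, l2, hs⟩ := List.append_of_mem (PySem.Dict.mem_items_insert_self d v w)
    simp [PySem.Dict.values, hs]
  · rw [PySem.Dict.values, PySem.Dict.items_insert_of_not_contains d w (by simpa using h)]
    simp

theorem pvIf_or {α : Type} (b1 b2 : Bool) (x y : α) :
    (if b1 then x else if b2 then x else y) = if b1 || b2 then x else y := by
  cases b1 <;> cases b2 <;> simp

def pvInvS (stA : PySem.Dict Int Int × List Int)
    (stB : PySem.Dict Int Int × PySem.Dict Int Int × Int) (n : Int) : Prop :=
  stB.1 = stA.1 ∧ stA.1.keys.Nodup ∧ (∀ w ∈ stA.1.values, 1 ≤ w) ∧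
  pvCofRel stB.2.1 stA.1.values ∧
  List.Pairwise (· < ·) stA.2 ∧ (∀ t ∈ stA.2, t ≤ n) ∧
  ((stA.2 = [] ∧ stB.2.2 = 0) ∨ stA.2.getLast? = some stB.2.2)

theorem pvStep_inv (stA : PySem.Dict Int Int × List Int)
    (stB : PySem.Dict Int Int × PySem.Dict Int Int × Int) (n v : Int)
    (h : pvInvS stA stB n) : pvInvS (pvStepA stA n v) (pvStepB stB n v) (n + 1) := by
  obtain ⟨hBA, hnd, hpos, hrel, hpw, hbd, hlink⟩ := h
  unfold pvStepA pvStepB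
  rw [hBA, pvCountsA_eq]
  dsimp only
  have hrel' := pvCofRel_insert stA.1 stB.2.1 v hnd hpos hrel
  dsimp only at hrel'
  have hne' := pvValues_insert_ne_nil stA.1 v (stA.1.getD v 0 + 1)
  have hcond := pvCondAB (stA.1.insert v (stA.1.getD v 0 + 1)) _ hne' hrel'
  refine ⟨rfl, PySem.Dict.nodup_keys_insert _ _ _ hnd, ?_, hrel', ?_, ?_, ?_⟩
  · intro w hw
    rcases PySem.Dict.mem_values_insert _ _ _ _ hw with rfl | hw'
    · by_cases hc : stA.1.contains v = true
      · have := hpos _ (pvGetD_mem_values stA.1 v hnd hc)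
        omega
      · rw [PySem.Dict.getD_of_not_contains stA.1 0 (by simpa using hc)]
        omega
    · exact hpos _ hw'
  · rw [pvIf_or]
    split
    · refine List.pairwise_append.2 ⟨hpw, by simp, ?_⟩
      intro a ha b hb
      simp only [List.mem_singleton] at hb
      subst hb
      exact lt_of_le_of_lt (hbd a ha) (by omega)
    · exact hpw
  · rw [pvIf_or]
    split
    · intro t ht
      rcases List.mem_append.1 ht with h | h
      · exact le_trans (hbd t h) (by omega)
      · simp at h; omega
    · intro t ht
      exact le_trans (hbd t ht) (by omega)
  · rw [pvIf_or, hcond]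
    split_ifs <;> first | (right; simp; done) | exact hlink

theorem pvEnum_append {α : Type} (l1 l2 : List α) (s : Int) :
    PySem.List.enumerate (l1 ++ l2) s
      = PySem.List.enumerate l1 s ++ PySem.List.enumerate l2 (s + l1.length) := by
  induction l1 generalizing s with
  | nil => simp [PySem.List.enumerate]
  | cons x t ih =>
    simp only [List.cons_append, PySem.List.enumerate, ih (s + 1), List.length_cons]
    push_cast
    ring_nf

def pvAfold (xs : List Int) : PySem.Dict Int Int × List Int :=
  (PySem.List.enumerate xs 0).foldl (fun st iv => pvStepA st iv.1 iv.2) (PySem.Dict.empty, [])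

def pvBfold (xs : List Int) : PySem.Dict Int Int × PySem.Dict Int Int × Int :=
  (PySem.List.enumerate xs 0).foldl (fun st iv => pvStepB st iv.1 iv.2)
    (PySem.Dict.empty, PySem.Dict.empty, 0)

theorem pvMain_inv (xs : List Int) : pvInvS (pvAfold xs) (pvBfold xs) (xs.length : Int) := by
  induction xs using List.reverseRecOn with
  | nil =>
    refine ⟨rfl, by simp [pvAfold, PySem.List.enumerate, PySem.Dict.keys, PySem.Dict.empty], by simp [pvAfold, PySem.List.enumerate, PySem.Dict.values, PySem.Dict.empty], ⟨by simp [pvBfold, PySem.List.enumerate, PySem.Dict.keys, PySem.Dict.empty], ?_⟩, by simp [pvAfold, PySem.List.enumerate], by simp [pvAfold, PySem.List.enumerate], Or.inl ⟨rfl, rfl⟩⟩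
    intro f
    simp [pvAfold, pvBfold, PySem.List.enumerate, PySem.Dict.get?, PySem.Dict.empty, PySem.Dict.values]
  | append_singleton l x ih =>
    have hA : pvAfold (l ++ [x]) = pvStepA (pvAfold l) (l.length : Int) x := by
      rw [pvAfold, pvEnum_append, List.foldl_append]
      simp [PySem.List.enumerate, pvAfold]
    have hB : pvBfold (l ++ [x]) = pvStepB (pvBfold l) (l.length : Int) x := by
      rw [pvBfold, pvEnum_append, List.foldl_append]
      simp [PySem.List.enumerate, pvBfold]
    rw [hA, hB]
    have := pvStep_inv (pvAfold l) (pvBfold l) (l.length : Int) x ih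
    simpa using this

theorem pvRangeFold {σ : Type} (f : σ → Int → Int → σ) (xs : List Int) (init : σ) :
    (PySem.List.pyRange 0 (PySem.List.len xs) 1).foldl
        (fun st i => f st i (PySem.List.pyGetD xs i 0)) init
      = (PySem.List.enumerate xs 0).foldl (fun st iv => f st iv.1 iv.2) init := by
  induction xs using List.reverseRecOn generalizing init with
  | nil => simp [PySem.List.len, PySem.List.pyRange_one_eq_nil, PySem.List.enumerate]
  | append_singleton l x ih =>
    have hlen : PySem.List.len (l ++ [x]) = (l.length : Int) + 1 := by
      simp [PySem.List.len_eq]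
    rw [hlen, PySem.List.pyRange_one_succ_right (by positivity), List.foldl_append,
      pvEnum_append, List.foldl_append]
    have hcongr : (PySem.List.pyRange 0 (l.length : Int) 1).foldl
          (fun st i => f st i (PySem.List.pyGetD (l ++ [x]) i 0)) init
        = (PySem.List.pyRange 0 (l.length : Int) 1).foldl
          (fun st i => f st i (PySem.List.pyGetD l i 0)) init := by
      apply PySem.List.foldl_congr_mem
      intro acc i hi
      have hi' := (PySem.List.mem_pyRange_one).1 hi
      have h0 : 0 ≤ i := hi'.1
      have h1 : i < (l.length : Int) := hi'.2
      rw [PySem.List.pyGetD_eq_getElem _ _ h0 (by simp only [List.length_append, List.length_singleton]; push_cast; omega),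
        PySem.List.pyGetD_eq_getElem _ _ h0 (by omega)]
      congr 1
      exact List.getElem_append_left (by omega)
    rw [hcongr]
    have hlast : PySem.List.pyGetD (l ++ [x]) (l.length : Int) 0 = x := by
      rw [PySem.List.pyGetD_eq_getElem _ _ (by positivity) (by simp)]
      simp
    have hrange0 : PySem.List.len l = (l.length : Int) := by simp [PySem.List.len_eq]
    rw [← hrange0, ih]
    simp [PySem.List.enumerate, hlast]

theorem pvEquiv (value_lst : List Int) : boring_prefix value_lst = boring_prefix_alt value_lst := by
  rw [boring_prefix, boring_prefix_alt]
  rw [pvRangeFold (fun st i v => pvStepA st i v) value_lst (PySem.Dict.empty, [])]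
  have hinv := pvMain_inv value_lst
  obtain ⟨_, _, _, _, hpw, _, hlink⟩ := hinv
  have hsorted : PySem.List.sorted (pvAfold value_lst).2 (fun x => x) = (pvAfold value_lst).2 :=
    PySem.List.sorted_eq_of_perm_of_pairwise_lt _ _ _ (List.Perm.refl _) hpw
  show PySem.List.pyGetD (PySem.List.sorted (pvAfold value_lst).2 (fun x => x)) (-1) 0
      = (pvBfold value_lst).2.2
  rw [hsorted]
  rcases hlink with ⟨h1, h2⟩ | h
  · rw [h1, h2]
    rfl
  · have hne : (pvAfold value_lst).2 ≠ [] := by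
      intro hnil
      rw [hnil] at h
      simp at h
    rw [PySem.List.pyGetD_neg_one _ _ hne]
    rw [List.getLast?_eq_some_getLast hne] at h
    exact Option.some_injective _ h

-- ===== VERDICT (by name: the statement is the Claim_ definition above) =====
theorem boring_prefix_spec : Claim_equal_boring_prefix := by
  unfold Claim_equal_boring_prefix Spec_boring_prefix
  intro value_lst _ _
  exact pvEquiv value_lst
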